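-- pv_equiv track=rewrite | github.com/QueryPlanner/blacki | src/blacki/telegram/bot.py | _escape_text_only
-- ===== SOURCE A (Python) =====
-- MARKDOWN_SPECIAL_CHARS = frozenset("_*[]()~>#+-=|{}.!\\")
--
-- def _escape_text_only(text: str) -> str:
--     """Escape special chars without code block handling (for internal use)."""
--     result: list[str] = []
--     in_code_block = False
--     in_inline_code = False
--     i = 0
--
--     while i < len(text):
--         if i + 2 <= len(text) and text[i : i + 3] == "```":
--             in_code_block = not in_code_block
--             result.append("```")
--             i += 3
--             continue
--
--         if text[i] == "`" and not in_code_block: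
--             in_inline_code = not in_inline_code
--             result.append("`")
--             i += 1
--             continue
--
--         if not in_code_block and not in_inline_code:
--             if text[i] in MARKDOWN_SPECIAL_CHARS:
--                 result.append("\\")
--             result.append(text[i])
--         else:
--             result.append(text[i])
--
--         i += 1
--
--     return "".join(result)
-- ===== SOURCE B (Python) =====
-- MARKDOWN_SPECIAL_CHARS = frozenset("_*[]()~>#+-=|{}.!\\")
-- _TABLE = {ord(c): "\\" + c for c in MARKDOWN_SPECIAL_CHARS}
--
--
-- def _escape_text_only(text: str) -> str:
--     """Jump between backtick delimiters with str.find and bulk-escape the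
--     plain-text chunks via str.translate, instead of scanning char by char."""
--     out: list[str] = []
--     pos = 0
--     n = len(text)
--     in_code_block = False
--     in_inline_code = False
--     while pos < n:
--         if in_code_block:
--             # everything up to the closing ``` is literal (lone ` included)
--             j = text.find("```", pos)
--             if j == -1:
--                 out.append(text[pos:])
--                 pos = n
--             else:
--                 out.append(text[pos : j] + "```")
--                 pos = j + 3
--                 in_code_block = False
--         else:
--             j = text.find("`", pos)
--             chunk = text[pos : j if j != -1 else n]
--             out.append(chunk if in_inline_code else chunk.translate(_TABLE))
--             if j == -1:
--                 pos = n
--             elif text[j : j + 3] == "```":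
--                 out.append("```")
--                 pos = j + 3
--                 in_code_block = True
--             else:
--                 out.append("`")
--                 pos = j + 1
--                 in_inline_code = not in_inline_code
--     return "".join(out)
-- ===== Notes on version B (the rewrite author's own statement) =====
-- stated objective: alternative
-- what changed: B replaces A's char-by-char scan (appending one escaped char per iteration) by chunk jumps: str.find locates the next backtick delimiter, the whole plain-text chunk before it is bulk-escaped with a precomputed str.translate table (or copied verbatim inside code), and code-block bodies are skipped to the closing ``` in one find.
import Mathlib
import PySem

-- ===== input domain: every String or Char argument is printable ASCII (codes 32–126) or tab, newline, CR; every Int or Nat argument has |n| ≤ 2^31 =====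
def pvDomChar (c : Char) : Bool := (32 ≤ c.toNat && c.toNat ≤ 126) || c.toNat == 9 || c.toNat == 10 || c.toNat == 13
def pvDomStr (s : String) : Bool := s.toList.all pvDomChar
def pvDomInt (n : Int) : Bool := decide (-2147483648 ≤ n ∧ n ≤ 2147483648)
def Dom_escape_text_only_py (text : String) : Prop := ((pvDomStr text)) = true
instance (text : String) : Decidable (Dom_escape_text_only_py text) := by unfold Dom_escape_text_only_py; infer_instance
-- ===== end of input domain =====

-- B jumps between backtick delimiters (str.find) and bulk-escapes whole plain-text
-- chunks via a translation table, instead of A's char-by-char scan (objective: alternative).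

-- ===== PORT A =====
-- MARKDOWN_SPECIAL_CHARS membership
def pvSpecial (c : Char) : Bool := "_*[]()~>#+-=|{}.!\\".toList.contains c

-- A's char-by-char scan over i; the remaining suffix text[i:] is the argument.
-- `i + 2 <= len(text) and text[i:i+3] == "```"` holds exactly when the suffix starts
-- with three backticks, i.e. c = '`' and the next two chars are '`','`'.
def pvEscA (cs : List Char) (blk inl : Bool) : List Char :=
  match cs with
  | [] => []
  | c :: rest =>
    if c = '`' ∧ rest.take 2 = ['`', '`'] then
      '`' :: '`' :: '`' :: pvEscA (rest.drop 2) (!blk) inl   -- i += 3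
    else if c = '`' ∧ !blk then
      '`' :: pvEscA rest blk (!inl)
    else if !blk && !inl then
      (if pvSpecial c then ['\\', c] else [c]) ++ pvEscA rest blk inl
    else
      c :: pvEscA rest blk inl
termination_by cs.length
decreasing_by
  · simp only [List.length_drop, List.length_cons]; omega
  · simp
  · simp
  · simp

def escape_text_only_py (text : String) : String :=
  String.ofList (pvEscA text.toList false false)

-- ===== PORT B =====
-- text.find("```", pos) on the suffix: .1 = chars before the first "```", .2 = some
-- (chars after it), or none when find returns -1.
def pvFindTriple : List Char → List Char × Option (List Char)
  | [] => ([], none)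
  | c :: r =>
    if c = '`' ∧ r.take 2 = ['`', '`'] then ([], some (r.drop 2))
    else ((pvFindTriple r).1.cons c, (pvFindTriple r).2)

-- needed by pvEscB's termination
theorem pvFindTriple_some_length (cs r : List Char)
    (h : (pvFindTriple cs).2 = some r) : r.length < cs.length := by
  induction cs generalizing r with
  | nil => simp [pvFindTriple] at h
  | cons c t ih =>
    rw [pvFindTriple] at h
    by_cases hc : c = '`' ∧ t.take 2 = ['`', '`']
    · rw [if_pos hc] at h
      simp only [Option.some.injEq] at h
      subst h
      have h2 := congrArg List.length hc.2
      simp only [List.length_take, List.length_drop, List.length_cons] at *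
      omega
    · rw [if_neg hc] at h
      exact Nat.lt_succ_of_lt (ih r h)

-- one character of .translate(_TABLE)
def pvEsc1 (c : Char) : List Char := if pvSpecial c then ['\\', c] else [c]

-- Source B's loop on the suffix text[pos:]: in a code block, jump to the closing ```;
-- otherwise split at the next '`' (j = find; none found ⇔ dropWhile gives []),
-- bulk-escape the chunk before it unless in inline code, and dispatch on ``` vs `.
def pvEscB (cs : List Char) (blk inl : Bool) : List Char :=
  if blk then
    match h : (pvFindTriple cs).2 with
    | none => (pvFindTriple cs).1
    | some r => (pvFindTriple cs).1 ++ '`' :: '`' :: '`' :: pvEscB r false inl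
  else
    let pre := cs.takeWhile (· ≠ '`')
    let pre' := if inl then pre else pre.flatMap pvEsc1
    if h1 : (cs.dropWhile (· ≠ '`')).take 3 = ['`', '`', '`'] then
      pre' ++ '`' :: '`' :: '`' :: pvEscB ((cs.dropWhile (· ≠ '`')).drop 3) true inl
    else if h2 : cs.dropWhile (· ≠ '`') ≠ [] then
      pre' ++ '`' :: pvEscB ((cs.dropWhile (· ≠ '`')).drop 1) false (!inl)
    else pre'
termination_by cs.length
decreasing_by
  · exact pvFindTriple_some_length cs r h
  · have hsub := List.Sublist.length_le (List.dropWhile_sublist (p := fun x => decide (x ≠ '`')) (l := cs))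
    have h3 := congrArg List.length h1
    simp only [List.length_take, List.length_drop, List.length_cons] at *
    omega
  · have hsub := List.Sublist.length_le (List.dropWhile_sublist (p := fun x => decide (x ≠ '`')) (l := cs))
    have h3 : 0 < (List.dropWhile (fun x => decide (x ≠ '`')) cs).length :=
      List.length_pos_of_ne_nil h2
    simp only [List.length_drop] at *
    omega

def escape_text_only_py_alt (text : String) : String :=
  String.ofList (pvEscB text.toList false false)

-- ===== PRECONDITION & SPEC =====
def Spec_escape_text_only_py (text : String) (out : String) : Prop := out = escape_text_only_py_alt text
instance (text : String) (out : String) : Decidable (Spec_escape_text_only_py text out) := by unfold Spec_escape_text_only_py; infer_instance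

-- ===== CLAIM (what is proved, stated in full; the proofs are below) =====
def Claim_equal_escape_text_only_py : Prop := ∀ (text : String), Dom_escape_text_only_py text → Spec_escape_text_only_py text (escape_text_only_py text)

-- ===== LEMMAS AND PROOFS =====

theorem pvTake2 {r : List Char} (h : r.take 2 = ['`', '`']) : ∃ u, r = '`' :: '`' :: u := by
  cases r with
  | nil => simp at h
  | cons a t =>
    cases t with
    | nil => simp at h
    | cons b u => simp at h; exact ⟨u, by simp [h.1, h.2]⟩

theorem pvEscB_true (cs : List Char) (inl : Bool) :
    pvEscB cs true inl =
      (match (pvFindTriple cs).2 with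
        | none => (pvFindTriple cs).1
        | some r => (pvFindTriple cs).1 ++ '`' :: '`' :: '`' :: pvEscB r false inl) := by
  rw [pvEscB, if_pos rfl]
  split <;> rename_i heq <;> rw [heq]

theorem pvEscB_nil (blk inl : Bool) : pvEscB [] blk inl = [] := by
  cases blk
  · rw [pvEscB]; simp [List.takeWhile, List.dropWhile]
  · rw [pvEscB_true]; simp [pvFindTriple]

theorem pvEscB_triple (u : List Char) (blk inl : Bool) :
    pvEscB ('`' :: '`' :: '`' :: u) blk inl = '`' :: '`' :: '`' :: pvEscB u (!blk) inl := by
  cases blk with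
  | true =>
    rw [pvEscB_true]
    have h : pvFindTriple ('`' :: '`' :: '`' :: u) = ([], some u) := by
      rw [pvFindTriple]; simp
    simp [h]
  | false =>
    rw [pvEscB]
    cases inl <;> simp [List.takeWhile, List.dropWhile]

theorem pvFindTriple_tick {r : List Char} (hr : r.take 2 ≠ ['`', '`']) :
    pvFindTriple ('`' :: r) = ((pvFindTriple r).1.cons '`', (pvFindTriple r).2) := by
  rw [pvFindTriple]; simp [hr]

theorem pvEscB_tick_true {r : List Char} (inl : Bool) (hr : r.take 2 ≠ ['`', '`']) :
    pvEscB ('`' :: r) true inl = '`' :: pvEscB r true inl := by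
  rw [pvEscB_true, pvEscB_true]
  cases h : (pvFindTriple r).2 <;> simp [pvFindTriple_tick hr, h]

theorem pvEscB_tick_false {r : List Char} (inl : Bool) (hr : r.take 2 ≠ ['`', '`']) :
    pvEscB ('`' :: r) false inl = '`' :: pvEscB r false (!inl) := by
  rw [pvEscB]
  have hdw : List.dropWhile (fun x => decide (x ≠ '`')) ('`' :: r) = '`' :: r := by
    simp [List.dropWhile]
  have htw : List.takeWhile (fun x => decide (x ≠ '`')) ('`' :: r) = [] := by
    simp [List.takeWhile]
  have h1 : ¬ (('`' :: r : List Char).take 3 = ['`', '`', '`']) := by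
    simp [List.take]; intro h; exact hr (by cases r <;> simp_all [List.take])
  simp only [htw, hdw]
  rw [dif_neg (by simpa using h1), dif_pos (by simp)]
  cases inl <;> simp

theorem pvEscB_ch {c : Char} (r : List Char) (blk inl : Bool) (hc : c ≠ '`') :
    pvEscB (c :: r) blk inl =
      (if blk || inl then [c] else pvEsc1 c) ++ pvEscB r blk inl := by
  cases blk with
  | true =>
    rw [pvEscB_true, pvEscB_true]
    have hft : pvFindTriple (c :: r) = ((pvFindTriple r).1.cons c, (pvFindTriple r).2) := by
      rw [pvFindTriple]; simp [hc]
    cases h : (pvFindTriple r).2 <;> simp [hft, h]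
  | false =>
    conv_lhs => rw [pvEscB]
    conv_rhs => rw [pvEscB]
    have hdw : List.dropWhile (fun x => decide (x ≠ '`')) (c :: r) =
        List.dropWhile (fun x => decide (x ≠ '`')) r := by simp [List.dropWhile, hc]
    have htw : List.takeWhile (fun x => decide (x ≠ '`')) (c :: r) =
        c :: List.takeWhile (fun x => decide (x ≠ '`')) r := by simp [List.takeWhile, hc]
    simp only [htw, hdw]
    by_cases h1 : (List.dropWhile (fun x => decide (x ≠ '`')) r).take 3 = ['`', '`', '`']
    · rw [dif_pos h1, dif_pos h1]; cases inl <;> simp [pvEsc1]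
    · rw [dif_neg h1, dif_neg h1]
      by_cases h2 : List.dropWhile (fun x => decide (x ≠ '`')) r ≠ []
      · rw [dif_pos h2, dif_pos h2]; cases inl <;> simp [pvEsc1]
      · rw [dif_neg h2, dif_neg h2]; cases inl <;> simp [pvEsc1]

theorem pvMain : ∀ (cs : List Char) (blk inl : Bool), pvEscA cs blk inl = pvEscB cs blk inl
  | [], blk, inl => by rw [pvEscA, pvEscB_nil]
  | c :: r, blk, inl => by
    rw [pvEscA]
    by_cases h3 : c = '`' ∧ r.take 2 = ['`', '`']
    · obtain ⟨hc, ht⟩ := h3; subst hc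
      obtain ⟨u, hu⟩ := pvTake2 ht; subst hu
      rw [if_pos ⟨rfl, by simp⟩, pvEscB_triple]
      simp [pvMain u (!blk) inl]
    · rw [if_neg h3]
      by_cases hc : c = '`'
      · subst hc
        have hr : r.take 2 ≠ ['`', '`'] := fun h => h3 ⟨rfl, h⟩
        cases blk with
        | false =>
          rw [if_pos ⟨rfl, rfl⟩, pvEscB_tick_false inl hr, pvMain r false (!inl)]
        | true =>
          rw [if_neg (by simp), if_neg (by simp), pvEscB_tick_true inl hr,
            pvMain r true inl]
      · rw [if_neg (by simp [hc]), pvEscB_ch r blk inl hc]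
        cases blk <;> cases inl <;>
          simp [pvEsc1, pvMain r _ _]
termination_by cs => cs.length
decreasing_by all_goals ((try subst hu); simp only [List.length_cons]; omega)

-- ===== VERDICT (by name: the statement is the Claim_ definition above) =====
theorem escape_text_only_py_spec : Claim_equal_escape_text_only_py := by
  intro text _
  unfold Spec_escape_text_only_py escape_text_only_py escape_text_only_py_alt
  rw [pvMain]
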